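-- pv_equiv track=rewrite | github.com/MarcoPWx/AI-OS-CE | tools/agent/engines/clean_code_advisor.py | _has_duplication
-- ===== SOURCE A (Python) =====
-- from typing import List, Optional, Dict, Any
--
-- def _has_duplication(code: str) -> bool:
--     # naive heuristic: any 5-line chunk repeating 3+ times
--     lines = [l.strip() for l in code.splitlines() if l.strip()]
--     seen: Dict[str, int] = {}
--     for i in range(0, max(0, len(lines) - 5)):
--         chunk = "\n".join(lines[i : i + 5])
--         seen[chunk] = seen.get(chunk, 0) + 1
--         if seen[chunk] >= 3:
--             return True
--     return False
-- ===== SOURCE B (Python) =====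
-- def _has_duplication(code: str) -> bool:
--     # sort-then-scan: build all 5-line chunks, sort them, and look for a run of 3 equal neighbours
--     lines = [l.strip() for l in code.splitlines() if l.strip()]
--     chunks = ["\n".join(lines[i:i + 5]) for i in range(max(0, len(lines) - 5))]
--     chunks.sort()
--     run = 1
--     for prev, cur in zip(chunks, chunks[1:]):
--         if cur == prev:
--             run += 1
--             if run >= 3:
--                 return True
--         else:
--             run = 1
--     return False
-- ===== Notes on version B (the rewrite author's own statement) =====
-- stated objective: alternative
-- what changed: Replaces A's incremental dict-counting loop with early return by building the full chunk list (same index range, preserving A's exclusion of the last window), sorting it, and scanning once for a run of 3 equal consecutive chunks.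
import Mathlib
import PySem

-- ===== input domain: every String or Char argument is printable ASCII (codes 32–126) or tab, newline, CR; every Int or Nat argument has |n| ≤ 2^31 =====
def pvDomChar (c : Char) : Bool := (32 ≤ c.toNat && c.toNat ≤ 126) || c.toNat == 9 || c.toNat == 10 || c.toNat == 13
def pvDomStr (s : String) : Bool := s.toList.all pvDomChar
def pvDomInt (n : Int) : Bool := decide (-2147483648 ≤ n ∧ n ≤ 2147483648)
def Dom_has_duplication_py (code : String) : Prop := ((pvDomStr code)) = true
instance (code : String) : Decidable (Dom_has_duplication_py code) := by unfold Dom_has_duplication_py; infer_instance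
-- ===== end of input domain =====

-- B replaces A's dict-counting loop with build-all-chunks, sort, and a one-pass scan for a run of 3 equal neighbours (alternative algorithm, same result).

-- ===== PORT A =====
-- lines = [l.strip() for l in code.splitlines() if l.strip()]   (this line is shared verbatim by both Pythons)
def pvLines (code : String) : List String :=
  (PySem.Str.splitlines code).filterMap
    (fun l => if PySem.Str.strip l = "" then none else some (PySem.Str.strip l))

-- chunk = "\n".join(lines[i : i + 5])   (identical expression in both Pythons)
def pvChunk (lines : List String) (i : Int) : String :=
  PySem.Str.join "\n" (PySem.List.slice lines (some i) (some (i + 5)))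

-- A's for-loop over range(0, max(0, len(lines) - 5)) with the dict `seen` and the early return
def aLoop (lines : List String) : List Int → PySem.Dict String Int → Bool
  | [], _ => false
  | i :: rest, seen =>
      let chunk := pvChunk lines i
      let n := seen.getD chunk 0 + 1
      if 3 ≤ n then true else aLoop lines rest (seen.insert chunk n)

def has_duplication_py (code : String) : Bool :=
  aLoop (pvLines code)
    (PySem.List.pyRange 0 (max 0 (((pvLines code).length : Int) - 5)) 1)
    PySem.Dict.empty

-- ===== PORT B =====
-- B's for-loop over zip(chunks, chunks[1:]) tracking the current run length, with early return
def bScan : String → Int → List String → Bool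
  | _, _, [] => false
  | prev, run, cur :: rest =>
      if cur = prev then
        if 3 ≤ run + 1 then true else bScan cur (run + 1) rest
      else bScan cur 1 rest

-- run = 1; zip(chunks, chunks[1:]) is empty when chunks is empty
def bStart : List String → Bool
  | [] => false
  | c :: rest => bScan c 1 rest

def has_duplication_py_alt (code : String) : Bool :=
  let chunks :=
    (PySem.List.pyRange 0 (max 0 (((pvLines code).length : Int) - 5)) 1).map
      (pvChunk (pvLines code))
  bStart (PySem.List.sorted chunks (fun x => x) false)

-- ===== PRECONDITION & SPEC =====
def Spec_has_duplication_py (code : String) (out : Bool) : Prop := out = has_duplication_py_alt code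
instance (code : String) (out : Bool) : Decidable (Spec_has_duplication_py code out) := by unfold Spec_has_duplication_py; infer_instance

-- ===== CLAIM (what is proved, stated in full; the proofs are below) =====
def Claim_equal_has_duplication_py : Prop := ∀ (code : String), Dom_has_duplication_py code → Spec_has_duplication_py code (has_duplication_py code)

-- ===== LEMMAS AND PROOFS =====

-- A's loop returns true iff some chunk occurs (counting the dict's head start) at least 3 times.
theorem aLoop_iff (lines : List String) (r : List Int) (d : PySem.Dict String Int) :
    aLoop lines r d = true ↔
      ∃ c ∈ r.map (pvChunk lines), 3 ≤ d.getD c 0 + ((r.map (pvChunk lines)).count c : Int) := by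
  induction r generalizing d with
  | nil => simp [aLoop]
  | cons i rest ih =>
      simp only [aLoop, List.map_cons]
      by_cases h : (3 : Int) ≤ d.getD (pvChunk lines i) 0 + 1
      · rw [if_pos h]
        constructor
        · intro _
          refine ⟨pvChunk lines i, List.mem_cons_self .., ?_⟩
          rw [List.count_cons_self]
          push_cast
          omega
        · intro _; rfl
      · rw [if_neg h, ih]
        constructor
        · rintro ⟨c, hc, h3⟩
          rw [PySem.Dict.getD_insert] at h3
          by_cases hec : c = pvChunk lines i
          · subst hec
            refine ⟨pvChunk lines i, List.mem_cons_self .., ?_⟩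
            rw [if_pos rfl] at h3
            rw [List.count_cons_self]
            push_cast at h3 ⊢
            omega
          · refine ⟨c, List.mem_cons_of_mem _ hc, ?_⟩
            rw [if_neg hec] at h3
            rw [List.count_cons, if_neg (by simpa using fun h' => hec h'.symm)]
            simpa using h3
        · rintro ⟨c, hc, h3⟩
          by_cases hec : c = pvChunk lines i
          · subst hec
            rw [List.count_cons_self] at h3
            have hpos : 0 < (rest.map (pvChunk lines)).count (pvChunk lines i) := by
              by_contra hnp
              have h0 : (rest.map (pvChunk lines)).count (pvChunk lines i) = 0 := by omega
              rw [h0] at h3; push_cast at h3; omega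
            refine ⟨pvChunk lines i, List.count_pos_iff.mp hpos, ?_⟩
            rw [PySem.Dict.getD_insert, if_pos rfl]
            push_cast at h3 ⊢
            omega
          · have hmem : c ∈ rest.map (pvChunk lines) := by
              rcases List.mem_cons.mp hc with h' | h'
              · exact absurd h' hec
              · exact h'
            refine ⟨c, hmem, ?_⟩
            rw [PySem.Dict.getD_insert, if_neg hec]
            rw [List.count_cons, if_neg (by simpa using fun h' => hec h'.symm)] at h3
            simpa using h3
-- B's run scan over a weakly increasing list finds a run of 3 iff some element has count ≥ 3.
theorem bScan_iff (rest : List String) : ∀ (prev : String) (run : Int),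
    run < 3 → (prev :: rest).Pairwise (· ≤ ·) →
    (bScan prev run rest = true ↔
      (3 ≤ run + (rest.count prev : Int) ∨ ∃ c ∈ rest, c ≠ prev ∧ 3 ≤ (rest.count c : Int))) := by
  induction rest with
  | nil =>
      intro prev run hrun _
      simp only [bScan]
      constructor
      · intro h; exact absurd h (by simp)
      · rintro (h | ⟨c, hc, _⟩)
        · simp at h; omega
        · simp at hc
  | cons cur rs ih =>
      intro prev run hrun hpw
      have hpw' : (cur :: rs).Pairwise (· ≤ ·) := hpw.tail
      by_cases hec : cur = prev
      · subst hec
        simp only [bScan, if_true]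
        by_cases h3 : (3 : Int) ≤ run + 1
        · rw [if_pos h3]
          constructor
          · intro _
            left
            rw [List.count_cons_self]
            push_cast
            omega
          · intro _; rfl
        · rw [if_neg h3, ih cur (run + 1) (by omega) hpw']
          rw [List.count_cons_self]
          constructor
          · rintro (h | ⟨c, hc, hne, h3c⟩)
            · left; push_cast at h ⊢; omega
            · right
              refine ⟨c, List.mem_cons_of_mem _ hc, hne, ?_⟩
              rw [List.count_cons, if_neg (by simpa using fun h' => hne h'.symm)]
              simpa using h3c
          · rintro (h | ⟨c, hc, hne, h3c⟩)
            · left; push_cast at h ⊢; omega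
            · rcases List.mem_cons.mp hc with h' | h'
              · exact absurd h' hne
              · right
                refine ⟨c, h', hne, ?_⟩
                rw [List.count_cons, if_neg (by simpa using fun h'' => hne h''.symm)] at h3c
                simpa using h3c
      · -- cur ≠ prev: the sorted order guarantees prev never reappears
        have hle : prev ≤ cur := (List.pairwise_cons.mp hpw).1 cur (List.mem_cons_self ..)
        have hlt : prev < cur := lt_of_le_of_ne hle (fun h => hec h.symm)
        have hprevnot : prev ∉ cur :: rs := by
          intro hmem
          rcases List.mem_cons.mp hmem with h' | h'
          · exact hec h'.symm
          · have := (List.pairwise_cons.mp hpw').1 prev h'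
            exact absurd (lt_of_lt_of_le hlt this) (lt_irrefl _)
        simp only [bScan, if_neg hec]
        rw [ih cur 1 (by omega) hpw']
        have hcount0 : (cur :: rs).count prev = 0 := List.count_eq_zero.mpr hprevnot
        constructor
        · rintro (h | ⟨c, hc, hne, h3c⟩)
          · right
            refine ⟨cur, List.mem_cons_self .., fun h' => hec h', ?_⟩
            rw [List.count_cons_self]
            push_cast at h ⊢
            omega
          · right
            have hcprev : c ≠ prev := by
              intro h'; subst h'
              exact hprevnot (List.mem_cons_of_mem _ hc)
            refine ⟨c, List.mem_cons_of_mem _ hc, hcprev, ?_⟩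
            rw [List.count_cons, if_neg (by simpa using fun h' => hne h'.symm)]
            simpa using h3c
        · rintro (h | ⟨c, hc, hne, h3c⟩)
          · rw [hcount0] at h; push_cast at h; omega
          · rcases List.mem_cons.mp hc with h' | h'
            · subst h'
              left
              rw [List.count_cons_self] at h3c
              push_cast at h3c ⊢
              omega
            · by_cases hnc : c = cur
              · subst hnc
                left
                rw [List.count_cons_self] at h3c
                push_cast at h3c ⊢
                omega
              · right
                refine ⟨c, h', hnc, ?_⟩
                rw [List.count_cons, if_neg (by simpa using fun h'' => hnc h''.symm)] at h3c
                simpa using h3c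

-- B's sorted-scan returns true iff some chunk occurs at least 3 times in the chunk list.
theorem bStart_iff (xs : List String) :
    bStart (PySem.List.sorted xs (fun x => x) false) = true ↔
      ∃ c ∈ xs, 3 ≤ (xs.count c : Int) := by
  have hperm := PySem.List.sorted_perm xs (fun x => x) false
  cases hs : PySem.List.sorted xs (fun x => x) false with
  | nil =>
      have : xs = [] := (PySem.List.sorted_eq_nil_iff ..).mp hs
      subst this
      simp [bStart]
  | cons c rest =>
      have hpw : (c :: rest).Pairwise (· ≤ ·) := by
        have := PySem.List.sorted_pairwise xs (fun x => x)
        rw [hs] at this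
        exact this
      rw [hs] at hperm
      simp only [bStart]
      rw [bScan_iff rest c 1 (by omega) hpw]
      constructor
      · rintro (h | ⟨d, hd, hne, h3⟩)
        · refine ⟨c, hperm.mem_iff.mp (List.mem_cons_self ..), ?_⟩
          rw [← hperm.count_eq, List.count_cons_self]
          push_cast at h ⊢
          omega
        · refine ⟨d, hperm.mem_iff.mp (List.mem_cons_of_mem _ hd), ?_⟩
          rw [← hperm.count_eq, List.count_cons, if_neg (by simpa using fun h' => hne h'.symm)]
          simpa using h3
      · rintro ⟨d, hd, h3⟩
        rw [← hperm.count_eq] at h3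
        by_cases hdc : d = c
        · subst hdc
          left
          rw [List.count_cons_self] at h3
          push_cast at h3 ⊢
          omega
        · right
          have hmem : d ∈ rest := by
            rcases List.mem_cons.mp (hperm.mem_iff.mpr hd) with h' | h'
            · exact absurd h' hdc
            · exact h'
          refine ⟨d, hmem, hdc, ?_⟩
          rw [List.count_cons, if_neg (by simpa using fun h' => hdc h'.symm)] at h3
          simpa using h3

theorem getD_empty_str_int (c : String) :
    (PySem.Dict.empty : PySem.Dict String Int).getD c 0 = 0 := rfl

-- ===== VERDICT (by name: the statement is the Claim_ definition above) =====
theorem has_duplication_py_spec : Claim_equal_has_duplication_py := by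
  intro code _
  unfold Spec_has_duplication_py has_duplication_py has_duplication_py_alt
  rw [Bool.eq_iff_iff]
  rw [aLoop_iff, bStart_iff]
  constructor
  · rintro ⟨c, hc, h3⟩
    rw [getD_empty_str_int] at h3
    exact ⟨c, hc, by omega⟩
  · rintro ⟨c, hc, h3⟩
    exact ⟨c, hc, by rw [getD_empty_str_int]; omega⟩
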